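-- pv_equiv track=rewrite | github.com/SarvathSharma/Python-Projects | Pig Latin.py | getStem
-- ===== SOURCE A (Python) =====
-- def getStem(aWord):
--     '''Return the stem of a word as a string. The stem is defined as the letters in the word after, and including, the first vowel.
--     >>> getStem("tree")
--     'ee'
--     >>> getStem("string")
--     'ing'
--     >>> getStem("happy")
--     'appy'
--     >>> getStem("I")
--     'I'
--     '''
--     punctuations = ',.?!'
--     vowels = 'aeiouyAEIOUY'
--     stem = ""
--     aWord = aWord.rstrip(punctuations)
--     vowelLocation = 0
--     for letter in aWord:
--         if letter in vowels:
--             vowelLocation = vowelLocation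
--             # Once the location of the first letter is found every other letter (including the vowel) is returned
--             stem += aWord[vowelLocation:]
--             return stem
--         else:
--             # If the certain letter is not a vowel 1 will be added to find the location of the first vowel
--             vowelLocation += 1
-- ===== SOURCE B (Python) =====
-- def getStem(aWord):
--     aWord = aWord.rstrip(',.?!')
--     hits = [i for i in (aWord.find(v) for v in 'aeiouyAEIOUY') if i >= 0]
--     if not hits:
--         return None
--     return aWord[min(hits):]
-- ===== Notes on version B (the rewrite author's own statement) =====
-- stated objective: alternative
-- what changed: Instead of scanning the word character-by-character with a running counter, B probes the stripped word once per vowel with str.find, keeps the non-negative hits and takes their minimum as the first-vowel index (None if no vowel is found).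
import Mathlib
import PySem

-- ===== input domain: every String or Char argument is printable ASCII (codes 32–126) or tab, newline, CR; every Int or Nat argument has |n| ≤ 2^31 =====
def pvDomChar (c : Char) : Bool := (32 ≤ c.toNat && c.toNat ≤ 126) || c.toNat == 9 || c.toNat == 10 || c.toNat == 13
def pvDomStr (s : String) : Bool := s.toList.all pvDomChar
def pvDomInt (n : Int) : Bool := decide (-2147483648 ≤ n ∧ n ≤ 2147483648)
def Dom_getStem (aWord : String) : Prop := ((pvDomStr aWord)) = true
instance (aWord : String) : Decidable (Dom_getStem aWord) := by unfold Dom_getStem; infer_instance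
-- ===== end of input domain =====

-- B replaces A's character-by-character scan with min over per-vowel str.find probes (alternative decomposition, same behaviour).


-- ===== PORT A =====
def pvVowels : List Char := "aeiouyAEIOUY".toList

-- hand port of Python's aWord.rstrip(',.?!'): drop the trailing characters from ',.?!' (exact)
def pvRstripPunct (s : String) : List Char :=
  (s.toList.reverse.dropWhile (fun c => c ∈ (",.?!".toList))).reverse

-- the 'for letter in aWord' loop of A: rest = remaining letters, w = the stripped word, k = vowelLocation
def getStemLoop (rest : List Char) (w : List Char) (k : Int) : Option String :=
  match rest with
  | [] => none
  | letter :: rest' =>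
    if letter ∈ pvVowels then
      some ("" ++ String.mk (PySem.List.slice w (some k) none))
    else
      getStemLoop rest' w (k + 1)

def getStem (aWord : String) : Option String :=
  let w := pvRstripPunct aWord
  getStemLoop w w 0

-- ===== PORT B =====
def getStem_alt (aWord : String) : Option String :=
  let w := pvRstripPunct aWord
  let hits := (pvVowels.map (fun v => PySem.Chars.find w [v])).filter (fun i => 0 ≤ i)
  match PySem.List.min? hits (fun x => x) with
  | none => none
  | some m => some (String.mk (PySem.List.slice w (some m) none))

-- ===== PRECONDITION & SPEC =====
def Spec_getStem (aWord : String) (out : Option String) : Prop := out = getStem_alt aWord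
instance (aWord : String) (out : Option String) : Decidable (Spec_getStem aWord out) := by unfold Spec_getStem; infer_instance

-- ===== CLAIM (what is proved, stated in full; the proofs are below) =====
def Claim_equal_getStem : Prop := ∀ (aWord : String), Dom_getStem aWord → Spec_getStem aWord (getStem aWord)

-- ===== LEMMAS AND PROOFS =====

def pvIsVowel (c : Char) : Bool := decide (c ∈ pvVowels)

lemma singleton_prefix_iff (a : Char) (l : List Char) : [a] <+: l ↔ l.head? = some a := by
  cases l with
  | nil => simp
  | cons b t =>
    constructor
    · rintro ⟨u, hu⟩; simp at hu; simp [hu.1]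
    · intro h; simp at h; exact ⟨t, by simp [h]⟩

lemma singleton_prefix_drop_iff (a : Char) (w : List Char) (t : Nat) :
    [a] <+: w.drop t ↔ w[t]? = some a := by
  rw [singleton_prefix_iff, List.head?_drop]

lemma findIdx?_some_spec (p : Char → Bool) (w : List Char) (i : Nat)
    (h : w.findIdx? p = some i) :
    ∃ v, w[i]? = some v ∧ p v = true ∧ ∀ j < i, ∀ c, w[j]? = some c → p c = false := by
  induction w generalizing i with
  | nil => simp at h
  | cons a t ih =>
    rw [List.findIdx?_cons] at h
    by_cases hp : p a = true
    · simp [hp] at h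
      exact ⟨a, by simp [← h], hp, by omega⟩
    · simp [hp] at h
      obtain ⟨i', hi', rfl⟩ := h
      obtain ⟨v, hv1, hv2, hv3⟩ := ih i' hi'
      refine ⟨v, by simpa using hv1, hv2, ?_⟩
      intro j hj c hc
      cases j with
      | zero => simp at hc; simp [← hc]; simpa using hp
      | succ j' => exact hv3 j' (by omega) c (by simpa using hc)

-- characterize the find of a single vowel when i is the FIRST vowel index
lemma find_single_eq (w : List Char) (i : Nat) (v : Char)
    (hv : w[i]? = some v)
    (hmin : ∀ j < i, ∀ c, w[j]? = some c → pvIsVowel c = false)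
    (hvv : pvIsVowel v = true) :
    PySem.Chars.find w [v] = (i : Int) := by
  have hpre : [v] <+: w.drop i := (singleton_prefix_drop_iff v w i).2 hv
  have hnn : 0 ≤ PySem.Chars.find w [v] := by
    rw [PySem.Chars.find_nonneg_iff, ← PySem.Chars.isIn_iff_infix,
        ← PySem.Chars.exists_prefix_drop_iff_isIn]
    exact ⟨i, hpre⟩
  obtain ⟨h1, h2⟩ := PySem.Chars.find_spec hnn
  set t := (PySem.Chars.find w [v]).toNat with ht
  have hti : t ≤ i := by
    by_contra hlt
    exact h2 i (by omega) hpre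
  have hwt : w[t]? = some v := (singleton_prefix_drop_iff v w t).1 h1
  have hit : i ≤ t := by
    by_contra hlt
    have := hmin t (by omega) v hwt
    rw [hvv] at this; exact absurd this (by simp)
  have : t = i := by omega
  omega

lemma mem_hits_iff (w : List Char) (x : Int) :
    x ∈ (pvVowels.map (fun v => PySem.Chars.find w [v])).filter (fun i => 0 ≤ i) ↔
    ∃ v ∈ pvVowels, PySem.Chars.find w [v] = x ∧ 0 ≤ x := by
  simp [List.mem_filter, List.mem_map]
  aesop

-- B's core equals the findIdx?-based characterization
lemma alt_char (w : List Char) :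
    (match PySem.List.min? ((pvVowels.map (fun v => PySem.Chars.find w [v])).filter (fun i => 0 ≤ i)) (fun x => x) with
     | none => none
     | some m => some (String.mk (PySem.List.slice w (some m) none))) =
    (match w.findIdx? pvIsVowel with
     | none => (none : Option String)
     | some i => some (String.mk (w.drop i))) := by
  set hits := (pvVowels.map (fun v => PySem.Chars.find w [v])).filter (fun i => 0 ≤ i) with hh
  cases hfi : w.findIdx? pvIsVowel with
  | none =>
    have hall : ∀ c ∈ w, pvIsVowel c = false := List.findIdx?_eq_none_iff.1 hfi
    have : hits = [] := by
      rw [hh, List.filter_eq_nil_iff]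
      intro x hx
      simp only [List.mem_map] at hx
      obtain ⟨v, hv, rfl⟩ := hx
      have hni : ¬ [v] <:+: w := by
        intro hinf
        obtain ⟨j, hj⟩ := (PySem.Chars.exists_prefix_drop_iff_isIn [v] w).2
          ((PySem.Chars.isIn_iff_infix [v] w).2 hinf)
        have := hall v (by
          have := (singleton_prefix_drop_iff v w j).1 hj
          exact List.mem_of_getElem? this)
        rw [pvIsVowel] at this
        simp at this
        exact this hv
      have := (PySem.Chars.find_eq_neg_one_iff w [v]).2 hni
      simp [this]
    rw [this]
    have h0 : PySem.List.min? ([] : List Int) (fun x => x) = none :=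
      (PySem.List.min?_eq_none_iff _ _).2 rfl
    rw [h0]
  | some i =>
    obtain ⟨v0, hv0, hvv0, hmin⟩ := findIdx?_some_spec pvIsVowel w i hfi
    have hfind0 : PySem.Chars.find w [v0] = (i : Int) := find_single_eq w i v0 hv0 hmin hvv0
    have hmem : (i : Int) ∈ hits := by
      rw [hh, mem_hits_iff]
      exact ⟨v0, by rw [pvIsVowel] at hvv0; simpa using hvv0, hfind0, by positivity⟩
    have hlb : ∀ x ∈ hits, (i : Int) ≤ x := by
      intro x hx
      rw [hh, mem_hits_iff] at hx
      obtain ⟨v, hv, hfx, hnn⟩ := hx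
      have hnn' : 0 ≤ PySem.Chars.find w [v] := by rw [hfx]; exact hnn
      obtain ⟨h1, _⟩ := PySem.Chars.find_spec hnn'
      set t := (PySem.Chars.find w [v]).toNat with ht
      have hwt : w[t]? = some v := (singleton_prefix_drop_iff v w t).1 h1
      have hit : i ≤ t := by
        by_contra hlt
        have := hmin t (by omega) v hwt
        rw [pvIsVowel] at this; simp at this; exact this hv
      omega
    cases hm : PySem.List.min? hits (fun x => x) with
    | none =>
      rw [PySem.List.min?_eq_none_iff] at hm
      rw [hm] at hmem; simp at hmem
    | some m =>
      have hmm : m ∈ hits := PySem.List.min?_mem hm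
      have h1 : m ≤ (i : Int) := PySem.List.min?_isMin hm _ hmem
      have h2 : (i : Int) ≤ m := hlb m hmm
      have hmi : m = (i : Int) := le_antisymm h1 h2
      simp only [hmi]
      rw [PySem.List.slice_from_natCast]

-- A's loop equals the findIdx?-based characterization
lemma loop_char (rest : List Char) (w : List Char) (k : Nat) :
    getStemLoop rest w (k : Int) =
    (match rest.findIdx? pvIsVowel with
     | none => (none : Option String)
     | some i => some (String.mk (w.drop (k + i)))) := by
  induction rest generalizing k with
  | nil => simp [getStemLoop]
  | cons a t ih =>
    rw [getStemLoop, List.findIdx?_cons]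
    by_cases hp : a ∈ pvVowels
    · have : pvIsVowel a = true := by rw [pvIsVowel]; simpa using hp
      simp only [hp, if_true, this]
      rw [PySem.List.slice_from_natCast]
      simp
    · have : pvIsVowel a = false := by rw [pvIsVowel]; simpa using hp
      simp only [hp, if_false, this]
      have : ((k : Int) + 1) = ((k + 1 : Nat) : Int) := by push_cast; ring
      rw [this, ih (k + 1)]
      cases t.findIdx? pvIsVowel with
      | none => simp
      | some i => simp; congr 2; omega

-- ===== VERDICT (by name: the statement is the Claim_ definition above) =====
theorem getStem_spec : Claim_equal_getStem := by
  intro aWord _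
  unfold Spec_getStem getStem getStem_alt
  rw [alt_char (pvRstripPunct aWord)]
  have := loop_char (pvRstripPunct aWord) (pvRstripPunct aWord) 0
  simp only [Nat.cast_zero] at this
  rw [this]
  cases (pvRstripPunct aWord).findIdx? pvIsVowel with
  | none => rfl
  | some i => simp
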